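-- pv_equiv track=rewrite | github.com/Global-ASFV-Research-Alliance/VirusPPIScreen | pMSA/common/pmsa_tools.py | pMSA_dict
-- ===== SOURCE A (Python) =====
-- def pMSA_dict(dict1, dict2, query1, query2):
-- #builds a pMSA dict from two dictionaries of single MSAs {code:[lab,seq]}. Paires based on common keys
-- #concatinates lab for new lab, and seqs for new seq
--     pMSA, unique1, unique2 = {}, {}, {}
--     # generate query seq!
--     pMSA[f"{query1}__{query2}"] = [f"{query1}__{query2}", dict1[query1][1]+dict2[query2][1]]
--     for code in dict1:
--         if code == query1:
--             continue
--         elif code in dict2: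
--             pMSA[code] = [dict1[code][0]+'__'+dict2[code][0], dict1[code][1]+dict2[code][1]]
--         else:
--             unique1[code] = [dict1[code][0], dict1[code][1]]
--     for code in dict2:
--         if code == query2:
--             continue
--         elif code not in dict1:
--             unique2[code] = [dict2[code][0], dict2[code][1]]
--     return pMSA, unique1, unique2
-- ===== SOURCE B (Python) =====
-- def pMSA_dict(dict1, dict2, query1, query2):
--     # sort-merge join: classify keys into common/only1/only2 by a two-pointer
--     # merge of the sorted key lists, then emit the three dicts from those sets.
--     qkey = f"{query1}__{query2}"
--     pMSA = {qkey: [qkey, dict1[query1][1] + dict2[query2][1]]}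
--     k1, k2 = sorted(dict1), sorted(dict2)
--     common, only1, only2 = [], [], []
--     i = j = 0
--     while i < len(k1) and j < len(k2):
--         if k1[i] == k2[j]:
--             common.append(k1[i]); i += 1; j += 1
--         elif k1[i] < k2[j]:
--             only1.append(k1[i]); i += 1
--         else:
--             only2.append(k2[j]); j += 1
--     only1.extend(k1[i:])
--     only2.extend(k2[j:])
--     common, only1, only2 = set(common), set(only1), set(only2)
--     for c in dict1:
--         if c in common and c != query1:
--             pMSA[c] = [dict1[c][0] + '__' + dict2[c][0], dict1[c][1] + dict2[c][1]]
--     unique1 = {c: [dict1[c][0], dict1[c][1]] for c in dict1 if c in only1 and c != query1}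
--     unique2 = {c: [dict2[c][0], dict2[c][1]] for c in dict2 if c in only2 and c != query2}
--     return pMSA, unique1, unique2
-- ===== Notes on version B (the rewrite author's own statement) =====
-- stated objective: alternative
-- what changed: A's branch-per-element scans with hash membership tests are replaced by a sort-merge join: the two sorted key lists are merged with two pointers to compute the common/only1/only2 key sets, and the three result dicts are then emitted from those precomputed sets; trades the hash lookups for an O(n log n) sort.
import Mathlib
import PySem

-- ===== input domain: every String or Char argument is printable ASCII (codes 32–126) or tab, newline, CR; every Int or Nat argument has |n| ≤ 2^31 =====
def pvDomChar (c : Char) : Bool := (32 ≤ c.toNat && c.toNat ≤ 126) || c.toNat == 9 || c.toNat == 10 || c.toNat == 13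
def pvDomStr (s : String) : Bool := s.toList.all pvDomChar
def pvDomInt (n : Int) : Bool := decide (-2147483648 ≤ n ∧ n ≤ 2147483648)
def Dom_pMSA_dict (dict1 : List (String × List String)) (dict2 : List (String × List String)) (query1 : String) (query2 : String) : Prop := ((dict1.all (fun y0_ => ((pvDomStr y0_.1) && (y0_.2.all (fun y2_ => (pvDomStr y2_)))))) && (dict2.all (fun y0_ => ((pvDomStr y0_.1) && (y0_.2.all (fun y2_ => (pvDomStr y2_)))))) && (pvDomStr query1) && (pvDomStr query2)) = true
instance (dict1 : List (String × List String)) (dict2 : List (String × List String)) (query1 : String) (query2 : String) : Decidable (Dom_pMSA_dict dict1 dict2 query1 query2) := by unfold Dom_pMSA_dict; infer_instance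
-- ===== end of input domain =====

-- B replaces A's hash-membership scans by a sort-merge join: a two-pointer merge of the
-- sorted key lists computes the common/only1/only2 key sets, from which the dicts are emitted.


-- ===== PORT A =====
-- the Python dict arguments arrive as association lists; PySem.Dict.ofList reproduces
-- Python dict construction (last duplicate wins, first position kept); 'for code in dict'
-- iterates the keys, dict[code][i] is getD + pyGetD (total under Pre_).
def pMSA_dict (dict1 : List (String × List String)) (dict2 : List (String × List String)) (query1 : String) (query2 : String) : (List (String × List String)) × (List (String × List String)) × (List (String × List String)) :=
  let d1 : PySem.Dict String (List String) := PySem.Dict.ofList dict1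
  let d2 : PySem.Dict String (List String) := PySem.Dict.ofList dict2
  let qkey := query1 ++ "__" ++ query2
  let pMSA0 : PySem.Dict String (List String) :=
    PySem.Dict.empty.insert qkey
      [qkey, PySem.List.pyGetD (d1.getD query1 []) 1 "" ++ PySem.List.pyGetD (d2.getD query2 []) 1 ""]
  -- for code in dict1: continue / paired / unique1
  let st := d1.keys.foldl (fun (s : PySem.Dict String (List String) × PySem.Dict String (List String)) code =>
      if code == query1 then s
      else if d2.contains code then
        (s.1.insert code [PySem.List.pyGetD (d1.getD code []) 0 "" ++ "__" ++ PySem.List.pyGetD (d2.getD code []) 0 "",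
                          PySem.List.pyGetD (d1.getD code []) 1 "" ++ PySem.List.pyGetD (d2.getD code []) 1 ""], s.2)
      else
        (s.1, s.2.insert code [PySem.List.pyGetD (d1.getD code []) 0 "", PySem.List.pyGetD (d1.getD code []) 1 ""]))
    (pMSA0, PySem.Dict.empty)
  -- for code in dict2: continue / skip common / unique2
  let unique2 := d2.keys.foldl (fun (u : PySem.Dict String (List String)) code =>
      if code == query2 then u
      else if d1.contains code then u
      else u.insert code [PySem.List.pyGetD (d2.getD code []) 0 "", PySem.List.pyGetD (d2.getD code []) 1 ""])
    PySem.Dict.empty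
  (st.1.items, st.2.items, unique2.items)

-- ===== PORT B =====
-- the two-pointer merge loop of Source B: walks both sorted key lists once, returning
-- (common, only1, only2); the Python appends to three accumulators, the recursion
-- builds the same three lists front-to-back.
def pvMerge3 : List String → List String → List String × List String × List String
  | [], k2 => ([], [], k2)
  | k1, [] => ([], k1, [])
  | a :: t1, b :: t2 =>
    if a == b then
      let r := pvMerge3 t1 t2; (a :: r.1, r.2.1, r.2.2)
    else if a < b then
      let r := pvMerge3 t1 (b :: t2); (r.1, a :: r.2.1, r.2.2)
    else
      let r := pvMerge3 (a :: t1) t2; (r.1, r.2.1, b :: r.2.2)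
  termination_by k1 k2 => k1.length + k2.length
  decreasing_by all_goals simp only [List.length_cons]; omega

def pMSA_dict_alt (dict1 : List (String × List String)) (dict2 : List (String × List String)) (query1 : String) (query2 : String) : (List (String × List String)) × (List (String × List String)) × (List (String × List String)) :=
  let d1 : PySem.Dict String (List String) := PySem.Dict.ofList dict1
  let d2 : PySem.Dict String (List String) := PySem.Dict.ofList dict2
  let qkey := query1 ++ "__" ++ query2
  let pMSA0 : PySem.Dict String (List String) :=
    PySem.Dict.empty.insert qkey
      [qkey, PySem.List.pyGetD (d1.getD query1 []) 1 "" ++ PySem.List.pyGetD (d2.getD query2 []) 1 ""]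
  -- k1, k2 = sorted(dict1), sorted(dict2); merge loop; then the three sets
  let k1 := PySem.List.sorted d1.keys (fun x => x) false
  let k2 := PySem.List.sorted d2.keys (fun x => x) false
  let m := pvMerge3 k1 k2
  let common : PySem.Set String := PySem.Set.ofList m.1
  let only1 : PySem.Set String := PySem.Set.ofList m.2.1
  let only2 : PySem.Set String := PySem.Set.ofList m.2.2
  -- for c in dict1: if c in common and c != query1: pMSA[c] = …
  let pMSA := d1.keys.foldl (fun (r : PySem.Dict String (List String)) c =>
      if PySem.Set.contains common c && c != query1 then
        r.insert c [PySem.List.pyGetD (d1.getD c []) 0 "" ++ "__" ++ PySem.List.pyGetD (d2.getD c []) 0 "",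
                    PySem.List.pyGetD (d1.getD c []) 1 "" ++ PySem.List.pyGetD (d2.getD c []) 1 ""]
      else r) pMSA0
  -- unique1 / unique2: filtered comprehensions over the original key orders
  let unique1 : PySem.Dict String (List String) := PySem.Dict.ofList
    ((d1.keys.filter (fun c => PySem.Set.contains only1 c && c != query1)).map (fun c =>
      (c, [PySem.List.pyGetD (d1.getD c []) 0 "", PySem.List.pyGetD (d1.getD c []) 1 ""])))
  let unique2 : PySem.Dict String (List String) := PySem.Dict.ofList
    ((d2.keys.filter (fun c => PySem.Set.contains only2 c && c != query2)).map (fun c =>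
      (c, [PySem.List.pyGetD (d2.getD c []) 0 "", PySem.List.pyGetD (d2.getD c []) 1 ""])))
  (pMSA.items, unique1.items, unique2.items)

-- ===== PRECONDITION & SPEC =====
-- Pre_ excludes exactly the inputs where the Python raises: KeyError (query1 ∉ dict1 or
-- query2 ∉ dict2) and IndexError (an accessed MSA value list shorter than 2).
def Pre_pMSA_dict (dict1 : List (String × List String)) (dict2 : List (String × List String)) (query1 : String) (query2 : String) : Prop :=
  let d1 : PySem.Dict String (List String) := PySem.Dict.ofList dict1
  let d2 : PySem.Dict String (List String) := PySem.Dict.ofList dict2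
  d1.contains query1 = true ∧ d2.contains query2 = true ∧
  2 ≤ (d1.getD query1 []).length ∧ 2 ≤ (d2.getD query2 []).length ∧
  (∀ p ∈ d1.items, p.1 ≠ query1 → 2 ≤ p.2.length ∧ (d2.contains p.1 = true → 2 ≤ (d2.getD p.1 []).length)) ∧
  (∀ p ∈ d2.items, p.1 ≠ query2 → d1.contains p.1 = false → 2 ≤ p.2.length)
instance (dict1 : List (String × List String)) (dict2 : List (String × List String)) (query1 : String) (query2 : String) : Decidable (Pre_pMSA_dict dict1 dict2 query1 query2) := by unfold Pre_pMSA_dict; infer_instance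

def pvWitness_pMSA_dict : (List (String × List String)) × (List (String × List String)) × String × String :=
  ([("q1", ["q1L", "AAA"]), ("x", ["xL1", "CCC"]), ("y", ["yL", "GGG"])],
   [("q2", ["q2L", "TTT"]), ("x", ["xL2", "AAC"]), ("z", ["zL", "CCA"])],
   "q1", "q2")

def Spec_pMSA_dict (dict1 : List (String × List String)) (dict2 : List (String × List String)) (query1 : String) (query2 : String) (out : (List (String × List String)) × (List (String × List String)) × (List (String × List String))) : Prop := out = pMSA_dict_alt dict1 dict2 query1 query2
instance (dict1 : List (String × List String)) (dict2 : List (String × List String)) (query1 : String) (query2 : String) (out : (List (String × List String)) × (List (String × List String)) × (List (String × List String))) : Decidable (Spec_pMSA_dict dict1 dict2 query1 query2 out) := by unfold Spec_pMSA_dict; infer_instance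

-- ===== CLAIM (what is proved, stated in full; the proofs are below) =====
def Claim_equal_pMSA_dict : Prop := ∀ (dict1 : List (String × List String)) (dict2 : List (String × List String)) (query1 : String) (query2 : String), Dom_pMSA_dict dict1 dict2 query1 query2 → Pre_pMSA_dict dict1 dict2 query1 query2 → Spec_pMSA_dict dict1 dict2 query1 query2 (pMSA_dict dict1 dict2 query1 query2)

-- ===== LEMMAS AND PROOFS =====

-- membership in the three outputs of the two-pointer merge of STRICTLY sorted lists:
-- common = intersection, only1/only2 = the two differences.
theorem pvMerge3_mem (k1 k2 : List String) (h1 : k1.Pairwise (· < ·)) (h2 : k2.Pairwise (· < ·)) (x : String) :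
    (x ∈ (pvMerge3 k1 k2).1 ↔ x ∈ k1 ∧ x ∈ k2) ∧
    (x ∈ (pvMerge3 k1 k2).2.1 ↔ x ∈ k1 ∧ x ∉ k2) ∧
    (x ∈ (pvMerge3 k1 k2).2.2 ↔ x ∈ k2 ∧ x ∉ k1) := by
  fun_induction pvMerge3 k1 k2 with
  | case1 k2 => simp
  | case2 k1 _ => simp
  | case3 a t1 b t2 hab r ih =>
    have hab' : a = b := by simpa using hab
    subst hab'
    obtain ⟨hat1, h1'⟩ := List.pairwise_cons.mp h1
    obtain ⟨hat2, h2'⟩ := List.pairwise_cons.mp h2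
    have hna1 : a ∉ t1 := fun h => lt_irrefl a (hat1 a h)
    have hna2 : a ∉ t2 := fun h => lt_irrefl a (hat2 a h)
    obtain ⟨i1, i2, i3⟩ := ih h1' h2'
    refine ⟨?_, ?_, ?_⟩ <;> simp only [r, List.mem_cons, i1, i2, i3] <;>
      constructor <;> rintro h
    · rcases h with h | ⟨ha, hb⟩
      · simp [h]
      · exact ⟨Or.inr ha, Or.inr hb⟩
    · rcases h with ⟨h | ha, hb⟩
      · exact Or.inl h
      · rcases hb with hb | hb
        · exact absurd hb.symm (fun e => hna1 (e ▸ ha))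
        · exact Or.inr ⟨ha, hb⟩
    · exact ⟨Or.inr h.1, by simp [h.2]; rintro rfl; exact hna1 h.1⟩
    · rcases h.1 with rfl | ha
      · exact absurd (Or.inl rfl) h.2
      · exact ⟨ha, fun hb => h.2 (Or.inr hb)⟩
    · exact ⟨Or.inr h.1, by simp [h.2]; rintro rfl; exact hna2 h.1⟩
    · rcases h.1 with rfl | ha
      · exact absurd (Or.inl rfl) h.2
      · exact ⟨ha, fun hb => h.2 (Or.inr hb)⟩
  | case4 a t1 b t2 hab hlt r ih =>
    have hne : a ≠ b := by simpa using hab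
    obtain ⟨hat1, h1'⟩ := List.pairwise_cons.mp h1
    obtain ⟨hat2, h2'⟩ := List.pairwise_cons.mp h2
    have hna2 : ¬(a = b ∨ a ∈ t2) := by
      rintro (rfl | h)
      · exact hne rfl
      · exact lt_irrefl a (lt_trans hlt (hat2 a h))
    obtain ⟨i1, i2, i3⟩ := ih h1' h2
    refine ⟨?_, ?_, ?_⟩ <;> simp only [r, List.mem_cons, i1, i2, i3]
    · constructor
      · rintro ⟨ha, hb⟩; exact ⟨Or.inr ha, hb⟩
      · rintro ⟨rfl | ha, hb⟩
        · exact absurd hb hna2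
        · exact ⟨ha, hb⟩
    · constructor
      · rintro (rfl | ⟨ha, hb⟩)
        · exact ⟨Or.inl rfl, hna2⟩
        · exact ⟨Or.inr ha, hb⟩
      · rintro ⟨rfl | ha, hb⟩
        · exact Or.inl rfl
        · exact Or.inr ⟨ha, hb⟩
    · constructor
      · rintro ⟨hb, ha⟩
        refine ⟨hb, ?_⟩
        rintro (rfl | h)
        · exact hna2 hb
        · exact ha h
      · rintro ⟨hb, ha⟩; exact ⟨hb, fun h => ha (Or.inr h)⟩
  | case5 a t1 b t2 hab hlt r ih =>
    have hne : a ≠ b := by simpa using hab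
    have hba : b < a := by
      rcases lt_trichotomy a b with h | h | h
      · exact absurd h hlt
      · exact absurd h hne
      · exact h
    obtain ⟨hat1, h1'⟩ := List.pairwise_cons.mp h1
    obtain ⟨hat2, h2'⟩ := List.pairwise_cons.mp h2
    have hnb1 : ¬(b = a ∨ b ∈ t1) := by
      rintro (rfl | h)
      · exact hne rfl
      · exact lt_irrefl b (lt_trans hba (hat1 b h))
    obtain ⟨i1, i2, i3⟩ := ih h1 h2'
    refine ⟨?_, ?_, ?_⟩ <;> simp only [r, List.mem_cons, i1, i2, i3]
    · constructor
      · rintro ⟨ha, hb⟩; exact ⟨ha, Or.inr hb⟩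
      · rintro ⟨ha, rfl | hb⟩
        · exact absurd ha hnb1
        · exact ⟨ha, hb⟩
    · constructor
      · rintro ⟨ha, hb⟩
        refine ⟨ha, ?_⟩
        rintro (rfl | h)
        · exact hnb1 ha
        · exact hb h
      · rintro ⟨ha, hb⟩; exact ⟨ha, fun h => hb (Or.inr h)⟩
    · constructor
      · rintro (rfl | ⟨hb, ha⟩)
        · exact ⟨Or.inl rfl, hnb1⟩
        · exact ⟨Or.inr hb, ha⟩
      · rintro ⟨rfl | hb, ha⟩
        · exact Or.inl rfl
        · exact Or.inr ⟨hb, ha⟩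

-- sorted(keys of a dict) is strictly increasing
theorem sorted_keys_pairwise_lt {ν : Type} (d : PySem.Dict String ν) (hk : d.keys.Nodup) :
    (PySem.List.sorted d.keys (fun x => x) false).Pairwise (· < ·) := by
  have hnd : (PySem.List.sorted d.keys (fun x => x) false).Nodup :=
    (PySem.List.sorted_perm d.keys (fun x => x) false).nodup_iff.mpr hk
  have hle := PySem.List.sorted_pairwise d.keys (fun x => x)
  exact (hle.and hnd).imp (fun h => lt_of_le_of_ne h.1 h.2)

-- membership transfer: x ∈ sorted d.keys ↔ d.contains x
theorem mem_sorted_keys_iff {ν : Type} (d : PySem.Dict String ν) (x : String) :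
    x ∈ PySem.List.sorted d.keys (fun x => x) false ↔ d.contains x = true := by
  rw [PySem.List.mem_sorted, PySem.Dict.contains_iff_mem_keys]

-- a conditional-insert foldl over keys is the insert-foldl of the filtered-and-mapped key list
theorem foldl_insert_filter_map_key {κ ν : Type} [BEq κ] (l : List κ) (P : κ → Bool)
    (val : κ → ν) (d0 : PySem.Dict κ ν) :
    ((l.filter P).map (fun c => (c, val c))).foldl (fun d q => d.insert q.1 q.2) d0
      = l.foldl (fun d c => if P c then d.insert c (val c) else d) d0 := by
  rw [List.foldl_map, List.foldl_filter]

-- A's single pair-state loop splits into a conditional-insert loop and an ofList comprehension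
theorem pair_loop_split {κ ν : Type} [BEq κ] (l : List κ) (c1 c2 : κ → Bool)
    (v1 v2 : κ → ν) (d0 : PySem.Dict κ ν) :
    l.foldl (fun s c =>
        if c1 c then s
        else if c2 c then (s.1.insert c (v1 c), s.2)
        else (s.1, s.2.insert c (v2 c))) (d0, PySem.Dict.empty)
      = (l.foldl (fun d c => if !c1 c && c2 c then d.insert c (v1 c) else d) d0,
         PySem.Dict.ofList ((l.filter (fun c => !c1 c && !c2 c)).map (fun c => (c, v2 c)))) := by
  unfold PySem.Dict.ofList PySem.Dict.update
  rw [foldl_insert_filter_map_key, ← PySem.List.foldl_prod_mk]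
  apply PySem.List.foldl_congr_mem
  intro acc c _
  by_cases h1 : c1 c <;> by_cases h2 : c2 c <;> simp [h1, h2]

-- A's skip-skip-insert loop is an ofList comprehension
theorem single_loop_split {κ ν : Type} [BEq κ] (l : List κ) (c1 c2 : κ → Bool) (v : κ → ν) :
    l.foldl (fun u c =>
        if c1 c then u
        else if c2 c then u
        else u.insert c (v c)) PySem.Dict.empty
      = PySem.Dict.ofList ((l.filter (fun c => !c1 c && !c2 c)).map (fun c => (c, v c))) := by
  unfold PySem.Dict.ofList PySem.Dict.update
  rw [foldl_insert_filter_map_key]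
  apply PySem.List.foldl_congr_mem
  intro acc c _
  by_cases h1 : c1 c <;> by_cases h2 : c2 c <;> simp [h1, h2]

-- ===== VERDICT (by name: the statement is the Claim_ definition above) =====
theorem pMSA_dict_spec : Claim_equal_pMSA_dict := by
  intro dict1 dict2 query1 query2 _dom _pre
  unfold Spec_pMSA_dict
  simp only [pMSA_dict, pMSA_dict_alt]
  rw [pair_loop_split, single_loop_split]
  have hnd1 : (PySem.Dict.ofList dict1 : PySem.Dict String (List String)).keys.Nodup :=
    PySem.Dict.nodup_keys_ofList dict1
  have hnd2 : (PySem.Dict.ofList dict2 : PySem.Dict String (List String)).keys.Nodup :=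
    PySem.Dict.nodup_keys_ofList dict2
  have hm := pvMerge3_mem
    (PySem.List.sorted (PySem.Dict.ofList dict1 : PySem.Dict String (List String)).keys (fun x => x) false)
    (PySem.List.sorted (PySem.Dict.ofList dict2 : PySem.Dict String (List String)).keys (fun x => x) false)
    (sorted_keys_pairwise_lt _ hnd1) (sorted_keys_pairwise_lt _ hnd2)
  -- common/only1 membership decided by d2.contains, for keys of d1; only2 by d1.contains
  refine congrArg₂ Prod.mk ?_ (congrArg₂ Prod.mk ?_ ?_)
  · refine congrArg PySem.Dict.items (PySem.List.foldl_congr_mem _ _ _ _ ?_)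
    intro acc c hc
    have hck1 : c ∈ PySem.List.sorted (PySem.Dict.ofList dict1 : PySem.Dict String (List String)).keys (fun x => x) false :=
      (mem_sorted_keys_iff _ c).mpr ((PySem.Dict.contains_iff_mem_keys _ _).mpr hc)
    by_cases h2 : (PySem.Dict.ofList dict2 : PySem.Dict String (List String)).contains c = true
    · have hmem : c ∈ (pvMerge3 _ _).1 := (hm c).1.mpr ⟨hck1, (mem_sorted_keys_iff _ c).mpr h2⟩
      simp [h2, PySem.Set.contains_eq_listContains, PySem.Set.mem_ofList, hmem, bne, Bool.and_comm]
    · have hmem : c ∉ (pvMerge3 _ _).1 := fun h => h2 ((mem_sorted_keys_iff _ c).mp ((hm c).1.mp h).2)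
      simp [h2, PySem.Set.contains_eq_listContains, PySem.Set.mem_ofList, hmem]
  · refine congrArg PySem.Dict.items (congrArg PySem.Dict.ofList (congrArg _ (List.filter_congr ?_)))
    intro c hc
    have hck1 : c ∈ PySem.List.sorted (PySem.Dict.ofList dict1 : PySem.Dict String (List String)).keys (fun x => x) false :=
      (mem_sorted_keys_iff _ c).mpr ((PySem.Dict.contains_iff_mem_keys _ _).mpr hc)
    by_cases h2 : (PySem.Dict.ofList dict2 : PySem.Dict String (List String)).contains c = true
    · have hmem : c ∉ (pvMerge3 _ _).2.1 :=
        fun h => ((hm c).2.1.mp h).2 ((mem_sorted_keys_iff _ c).mpr h2)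
      simp [h2, PySem.Set.contains_eq_listContains, PySem.Set.mem_ofList, hmem]
    · have hmem : c ∈ (pvMerge3 _ _).2.1 :=
        (hm c).2.1.mpr ⟨hck1, fun h => h2 ((mem_sorted_keys_iff _ c).mp h)⟩
      simp [h2, PySem.Set.contains_eq_listContains, PySem.Set.mem_ofList, hmem, bne, Bool.and_comm]
  · refine congrArg PySem.Dict.items (congrArg PySem.Dict.ofList (congrArg _ (List.filter_congr ?_)))
    intro c hc
    have hck2 : c ∈ PySem.List.sorted (PySem.Dict.ofList dict2 : PySem.Dict String (List String)).keys (fun x => x) false :=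
      (mem_sorted_keys_iff _ c).mpr ((PySem.Dict.contains_iff_mem_keys _ _).mpr hc)
    by_cases h1 : (PySem.Dict.ofList dict1 : PySem.Dict String (List String)).contains c = true
    · have hmem : c ∉ (pvMerge3 _ _).2.2 :=
        fun h => ((hm c).2.2.mp h).2 ((mem_sorted_keys_iff _ c).mpr h1)
      simp [h1, PySem.Set.contains_eq_listContains, PySem.Set.mem_ofList, hmem]
    · have hmem : c ∈ (pvMerge3 _ _).2.2 :=
        (hm c).2.2.mpr ⟨hck2, fun h => h1 ((mem_sorted_keys_iff _ c).mp h)⟩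
      simp [h1, PySem.Set.contains_eq_listContains, PySem.Set.mem_ofList, hmem, bne, Bool.and_comm]
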